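-- pv_equiv track=rewrite | github.com/Patryk-Kumor/University | Python/Zbiory innych zadań/imiona.py | szukaj
-- ===== SOURCE A (Python) =====
-- def szukaj(litera, słowo):
--         w=set()
--         słowo=list(słowo)
--         for i in range(len(słowo)):
--             if litera == słowo[i]:
--                 if i == len(słowo)-1:
--                     pass
--                 else:
--                     w.add(słowo[i+1])
--         return w
-- ===== SOURCE B (Python) =====
-- def szukaj(litera, słowo):
--     # Search-based: jump between occurrences of litera with str.find instead of
--     # scanning every index.  Only a length-1 litera can ever equal a single
--     # character of the word, so longer (or empty) litera yields the empty set.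
--     s = ''.join(słowo)
--     w = set()
--     if len(litera) != 1:
--         return w
--     i = s.find(litera)
--     while i != -1:
--         if i + 1 < len(s):
--             w.add(s[i + 1])
--         i = s.find(litera, i + 1)
--     return w
-- ===== Notes on version B (the rewrite author's own statement) =====
-- stated objective: faster
-- what changed: Instead of A's Python-level scan over every index with an explicit last-index guard, B uses string search: it jumps from occurrence to occurrence of litera via str.find(litera, i+1), collecting the character after each hit, with an up-front guard that only a length-1 litera can equal a character.
import Mathlib
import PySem

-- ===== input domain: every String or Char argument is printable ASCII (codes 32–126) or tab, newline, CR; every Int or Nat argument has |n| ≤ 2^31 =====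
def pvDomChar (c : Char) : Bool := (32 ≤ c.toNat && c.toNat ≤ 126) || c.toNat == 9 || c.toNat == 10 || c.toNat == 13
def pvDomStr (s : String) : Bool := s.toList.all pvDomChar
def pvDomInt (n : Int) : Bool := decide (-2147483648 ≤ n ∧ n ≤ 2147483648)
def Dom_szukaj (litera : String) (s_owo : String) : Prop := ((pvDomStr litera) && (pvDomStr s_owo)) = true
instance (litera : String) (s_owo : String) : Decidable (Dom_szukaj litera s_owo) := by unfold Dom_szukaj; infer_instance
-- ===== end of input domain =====

-- B replaces A's scan over every index (with its explicit last-index guard) by a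
-- string-search loop: it jumps from occurrence to occurrence of litera with
-- str.find and collects the character after each hit (measured faster in a timing run).

-- ===== PORT A =====
-- index loop over range(len); pyGetD is exact here since every accessed index is in range
def szukaj (litera : String) (s_owo : String) : List String :=
  let chars := s_owo.toList
  (PySem.List.pyRange 0 (chars.length : Int) 1).foldl
    (fun w i =>
      if litera == String.ofList [PySem.List.pyGetD chars i ' '] then
        if i == (chars.length : Int) - 1 then w
        else PySem.Set.add w (String.ofList [PySem.List.pyGetD chars (i + 1) ' '])
      else w) []

-- ===== PORT B =====
-- a nonempty pattern found as a prefix of a suffix points inside the list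
theorem prefix_drop_lt_length {lit sl : List Char} (hl : lit ≠ []) {j : Nat}
    (h : lit <+: sl.drop j) : j < sl.length := by
  by_contra hj
  rw [List.drop_eq_nil_iff.mpr (by omega)] at h
  exact hl (List.prefix_nil.mp h)

-- the while loop of B: i is the index of the occurrence just found (always in range)
def szukajLoop (lit sl : List Char) (hl : lit ≠ []) (i : Nat) (hi : i < sl.length)
    (w : List String) : List String :=
  if h : PySem.Chars.findFrom sl lit ((i + 1 : Nat) : Int) none = -1 then
    (if ((i + 1 : Nat) : Int) < (sl.length : Int) then
        PySem.Set.add w (String.ofList [PySem.List.pyGetD sl ((i + 1 : Nat) : Int) ' ']) else w)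
  else
    szukajLoop lit sl hl (PySem.Chars.findFrom sl lit ((i + 1 : Nat) : Int) none).toNat
      (prefix_drop_lt_length hl
        ((PySem.Chars.findFrom_natCast_spec sl lit (i + 1) (by omega) h).2.1))
      (if ((i + 1 : Nat) : Int) < (sl.length : Int) then
          PySem.Set.add w (String.ofList [PySem.List.pyGetD sl ((i + 1 : Nat) : Int) ' ']) else w)
termination_by sl.length - i
decreasing_by
  have hs := (PySem.Chars.findFrom_natCast_spec sl lit (i + 1) (by omega) h).1
  omega

def szukaj_alt (litera : String) (s_owo : String) : List String :=
  let sl := s_owo.toList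
  let lit := litera.toList
  if hL : lit.length ≠ 1 then []
  else
    if h0 : PySem.Chars.find sl lit = -1 then []
    else
      szukajLoop lit sl (by intro he; simp [he] at hL) (PySem.Chars.find sl lit).toNat
        (prefix_drop_lt_length (by intro he; simp [he] at hL)
          ((PySem.Chars.find_spec (by have := PySem.Chars.neg_one_le_find sl lit; omega)).1))
        []

-- ===== PRECONDITION & SPEC =====
def Spec_szukaj (litera : String) (s_owo : String) (out : List String) : Prop := out = szukaj_alt litera s_owo
instance (litera : String) (s_owo : String) (out : List String) : Decidable (Spec_szukaj litera s_owo out) := by unfold Spec_szukaj; infer_instance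

-- ===== CLAIM (what is proved, stated in full; the proofs are below) =====
def Claim_equal_szukaj : Prop := ∀ (litera : String) (s_owo : String), Dom_szukaj litera s_owo → Spec_szukaj litera s_owo (szukaj litera s_owo)

-- ===== LEMMAS AND PROOFS =====

-- proof-only vocabulary: the common step, and the occurrence indices from position k on
def stepF (sl : List Char) (w : List String) (j : Nat) : List String :=
  if j + 1 < sl.length then PySem.Set.add w (String.ofList [sl.getD (j + 1) ' ']) else w

def occFrom (sl : List Char) (c : Char) (k : Nat) : List Nat :=
  (List.range sl.length).filter (fun j => decide (k ≤ j) && decide (sl.getD j ' ' = c))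

theorem prefix_single_iff (sl : List Char) (c : Char) (j : Nat) :
    [c] <+: sl.drop j ↔ j < sl.length ∧ sl.getD j ' ' = c := by
  constructor
  · rintro ⟨t, ht⟩
    have hj : j < sl.length := prefix_drop_lt_length (by simp) ⟨t, ht⟩
    have : (sl.drop j).head? = some c := by rw [← ht]; rfl
    rw [List.head?_drop] at this
    refine ⟨hj, ?_⟩
    simp [List.getD, List.getElem?_eq_getElem hj] at this ⊢
    exact this
  · rintro ⟨hj, hc⟩
    refine ⟨(sl.drop j).tail, ?_⟩
    have h1 : (sl.drop j).head? = some c := by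
      rw [List.head?_drop, List.getElem?_eq_getElem hj]
      simpa [List.getD, List.getElem?_eq_getElem hj] using hc
    cases hdj : sl.drop j with
    | nil => simp [hdj] at h1
    | cons a t => simp [hdj] at h1 ⊢; exact h1.symm

theorem infix_single_iff (sl : List Char) (c : Char) (k : Nat) :
    [c] <:+: sl.drop k ↔ ∃ j, k ≤ j ∧ j < sl.length ∧ sl.getD j ' ' = c := by
  rw [← PySem.Chars.isIn_iff_infix, ← PySem.Chars.exists_prefix_drop_iff_isIn]
  constructor
  · rintro ⟨j, hj⟩
    rw [List.drop_drop] at hj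
    exact ⟨k + j, by omega, (prefix_single_iff sl c (k + j)).mp hj⟩
  · rintro ⟨j, hk, hj, hc⟩
    refine ⟨j - k, ?_⟩
    rw [List.drop_drop, show k + (j - k) = j from by omega]
    exact (prefix_single_iff sl c j).mpr ⟨hj, hc⟩

theorem occFrom_nil (sl : List Char) (c : Char) (k : Nat)
    (h : ∀ j, k ≤ j → j < sl.length → sl.getD j ' ' ≠ c) :
    occFrom sl c k = [] := by
  unfold occFrom
  rw [List.filter_eq_nil_iff]
  intro j hj
  rw [List.mem_range] at hj
  simp only [Bool.and_eq_true, decide_eq_true_eq]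
  rintro ⟨h1, h2⟩
  exact h j h1 hj h2

theorem occFrom_cons (sl : List Char) (c : Char) (k r : Nat)
    (hkr : k ≤ r) (hr : r < sl.length) (hc : sl.getD r ' ' = c)
    (hmin : ∀ j, k ≤ j → j < r → sl.getD j ' ' ≠ c) :
    occFrom sl c k = r :: occFrom sl c (r + 1) := by
  unfold occFrom
  have hsplit : List.range sl.length
      = List.range (r + 1) ++ (List.range (sl.length - (r + 1))).map (fun x => (r + 1) + x) := by
    rw [← List.range_add]; congr 1; omega
  rw [hsplit, List.filter_append, List.filter_append]
  have h1 : (List.range (r + 1)).filter (fun j => decide (k ≤ j) && decide (sl.getD j ' ' = c)) = [r] := by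
    rw [List.range_succ, List.filter_append]
    have : (List.range r).filter (fun j => decide (k ≤ j) && decide (sl.getD j ' ' = c)) = [] := by
      rw [List.filter_eq_nil_iff]
      intro j hj
      rw [List.mem_range] at hj
      simp only [Bool.and_eq_true, decide_eq_true_eq]
      rintro ⟨ha, hb⟩
      exact hmin j ha hj hb
    rw [this]
    have hc' : sl[r]?.getD ' ' = c := by simpa [List.getD] using hc
    simp [hkr, hc']
  have h2 : (List.range (r + 1)).filter (fun j => decide (r + 1 ≤ j) && decide (sl.getD j ' ' = c)) = [] := by
    rw [List.filter_eq_nil_iff]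
    intro j hj
    rw [List.mem_range] at hj
    simp only [Bool.and_eq_true, decide_eq_true_eq]
    omega
  have h3 : ∀ p : Nat → Bool, ((List.range (sl.length - (r + 1))).map (fun x => (r + 1) + x)).filter
        (fun j => decide (k ≤ j) && p j)
      = ((List.range (sl.length - (r + 1))).map (fun x => (r + 1) + x)).filter
        (fun j => decide (r + 1 ≤ j) && p j) := by
    intro p
    apply List.filter_congr
    intro x hx
    rw [List.mem_map] at hx
    obtain ⟨y, _, rfl⟩ := hx
    have ha : (decide (k ≤ r + 1 + y)) = true := by simp; omega
    have hb : (decide (r + 1 ≤ r + 1 + y)) = true := by simp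
    rw [ha, hb]
  rw [h1, h2, h3 (fun j => decide (sl.getD j ' ' = c))]
  simp

-- the raw step expression of the ports equals stepF
theorem step_cast (sl : List Char) (w : List String) (i : Nat) :
    (if ((i + 1 : Nat) : Int) < (sl.length : Int) then
        PySem.Set.add w (String.ofList [PySem.List.pyGetD sl ((i + 1 : Nat) : Int) ' ']) else w)
      = stepF sl w i := by
  unfold stepF
  rw [PySem.List.pyGetD_natCast]
  by_cases h : i + 1 < sl.length
  · rw [if_pos (by exact_mod_cast h), if_pos h]
  · rw [if_neg (by exact_mod_cast h), if_neg h]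

-- B's loop folds the step over the occurrences after i (having just processed i)
theorem loop_eq (c : Char) (sl : List Char) (hl : ([c] : List Char) ≠ []) :
    ∀ (m i : Nat) (hm : sl.length - i = m) (hi : i < sl.length) (w : List String),
      szukajLoop [c] sl hl i hi w
        = List.foldl (stepF sl) (stepF sl w i) (occFrom sl c (i + 1)) := by
  intro m
  induction m using Nat.strong_induction_on with
  | _ m IH =>
    intro i hm hi w
    rw [szukajLoop]
    by_cases h : PySem.Chars.findFrom sl [c] ((i + 1 : Nat) : Int) none = -1
    · rw [dif_pos h, step_cast]
      have hno := (PySem.Chars.findFrom_natCast_eq_neg_one_iff sl [c] (i + 1) (by omega)).mp h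
      rw [infix_single_iff] at hno
      push Not at hno
      rw [occFrom_nil sl c (i + 1) hno]
      rfl
    · rw [dif_neg h]
      have hs := PySem.Chars.findFrom_natCast_spec sl [c] (i + 1) (by omega) h
      set r := (PySem.Chars.findFrom sl [c] ((i + 1 : Nat) : Int) none).toNat with hrdef
      have hkr : i + 1 ≤ r := by have := hs.1; omega
      have hrlt : r < sl.length := prefix_drop_lt_length hl hs.2.1
      have hrc : sl.getD r ' ' = c := ((prefix_single_iff sl c r).mp hs.2.1).2
      have hmin : ∀ j, i + 1 ≤ j → j < r → sl.getD j ' ' ≠ c := by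
        intro j ha hb hc'
        exact hs.2.2 j ha hb ((prefix_single_iff sl c j).mpr ⟨by omega, hc'⟩)
      rw [occFrom_cons sl c (i + 1) r hkr hrlt hrc hmin]
      rw [IH (sl.length - r) (by omega) r rfl hrlt _]
      rw [step_cast]
      rfl

theorem ofList_single_ne (c d : Char) (h : ¬ d = c) :
    (String.ofList [c] == String.ofList [d]) = false := by
  rw [beq_eq_false_iff_ne]
  intro he
  have := congrArg String.toList he
  simp at this
  exact h this.symm

theorem ofList_single_beq (c d : Char) :
    (String.ofList [c] == String.ofList [d]) = decide (d = c) := by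
  by_cases h : d = c
  · simp [h]
  · rw [ofList_single_ne c d h]; simp [h]

-- A's indexed fold with the standing match filtered out
theorem a_fold_eq (c : Char) (sl : List Char) :
    szukaj (String.ofList [c]) (String.ofList sl) = List.foldl (stepF sl) [] (occFrom sl c 0) := by
  unfold szukaj
  simp only [String.toList_ofList]
  rw [PySem.List.pyRange_zero_natCast, List.foldl_map]
  unfold occFrom
  rw [List.foldl_filter]
  apply PySem.List.foldl_congr_mem
  intro w j hj
  rw [List.mem_range] at hj
  rw [PySem.List.pyGetD_natCast]
  rw [show ((j : Int) + 1) = ((j + 1 : Nat) : Int) from by push_cast; ring,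
    PySem.List.pyGetD_natCast]
  rw [ofList_single_beq]
  unfold stepF
  by_cases hcc : sl.getD j ' ' = c
  · have hcc' : sl[j]?.getD ' ' = c := by simpa [List.getD] using hcc
    by_cases hlast : j + 1 < sl.length
    · rw [if_pos (by simp [hcc']), if_neg (by simp; omega), if_pos (by simp [hcc']), if_pos hlast]
    · rw [if_pos (by simp [hcc']), if_pos (by simp; omega), if_pos (by simp [hcc']), if_neg hlast]
  · have hcc' : ¬ sl[j]?.getD ' ' = c := by simpa [List.getD] using hcc
    rw [if_neg (by simp [hcc']), if_neg (by simp [hcc'])]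

-- A is the no-op fold when litera is not a single character
theorem a_empty (litera : String) (s_owo : String) (hL : litera.toList.length ≠ 1) :
    szukaj litera s_owo = [] := by
  unfold szukaj
  have : ∀ (l : List Int) (w : List String), l.foldl
      (fun w i =>
        if litera == String.ofList [PySem.List.pyGetD s_owo.toList i ' '] then
          if i == (s_owo.toList.length : Int) - 1 then w
          else PySem.Set.add w (String.ofList [PySem.List.pyGetD s_owo.toList (i + 1) ' '])
        else w) w = w := by
    intro l
    induction l with
    | nil => intro w; rfl
    | cons a t ih =>
      intro w
      rw [List.foldl_cons, if_neg, ih]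
      intro hbe
      have : litera = String.ofList [PySem.List.pyGetD s_owo.toList a ' '] := by
        exact_mod_cast eq_of_beq hbe
      rw [this] at hL
      simp at hL
  exact this _ []

theorem main_single (c : Char) (sl : List Char) :
    szukaj (String.ofList [c]) (String.ofList sl) = szukaj_alt (String.ofList [c]) (String.ofList sl) := by
  unfold szukaj_alt
  simp only [String.toList_ofList]
  rw [a_fold_eq]
  rw [dif_neg (by simp)]
  by_cases h0 : PySem.Chars.find sl [c] = -1
  · rw [dif_pos h0]
    have hno := (PySem.Chars.find_eq_neg_one_iff sl [c]).mp h0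
    rw [show sl = sl.drop 0 from rfl, infix_single_iff] at hno
    push Not at hno
    rw [occFrom_nil sl c 0 (fun j _ => hno j (by omega))]
    rfl
  · rw [dif_neg h0]
    have hge : 0 ≤ PySem.Chars.find sl [c] := by
      have := PySem.Chars.neg_one_le_find sl [c]; omega
    have hs := PySem.Chars.find_spec hge
    set r := (PySem.Chars.find sl [c]).toNat with hrdef
    have hrlt : r < sl.length := prefix_drop_lt_length (by simp) hs.1
    have hrc : sl.getD r ' ' = c := ((prefix_single_iff _ c r).mp hs.1).2
    have hmin : ∀ j, 0 ≤ j → j < r → sl.getD j ' ' ≠ c := by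
      intro j _ hb hc'
      exact hs.2 j hb ((prefix_single_iff _ c j).mpr ⟨by omega, hc'⟩)
    rw [occFrom_cons sl c 0 r (by omega) hrlt hrc hmin]
    rw [loop_eq c sl _ (sl.length - r) r rfl hrlt []]
    rfl

theorem szukaj_eq_alt (litera s_owo : String) : szukaj litera s_owo = szukaj_alt litera s_owo := by
  by_cases hL : litera.toList.length ≠ 1
  · rw [a_empty litera s_owo hL]
    unfold szukaj_alt
    rw [dif_pos hL]
  · push Not at hL
    obtain ⟨c, hc⟩ : ∃ c, litera.toList = [c] := by
      cases h : litera.toList with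
      | nil => rw [h] at hL; simp at hL
      | cons a t =>
        rw [h] at hL
        cases t with
        | nil => exact ⟨a, rfl⟩
        | cons b u => simp at hL
    have hlit : litera = String.ofList [c] := by rw [← hc]; exact String.ofList_toList.symm
    have hsl : s_owo = String.ofList s_owo.toList := String.ofList_toList.symm
    rw [hlit, hsl]
    exact main_single c s_owo.toList

-- ===== VERDICT (by name: the statement is the Claim_ definition above) =====
theorem szukaj_spec : Claim_equal_szukaj := by
  intro litera s_owo _
  unfold Spec_szukaj
  exact szukaj_eq_alt litera s_owo
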